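-- pv_equiv track=rewrite | github.com/K4chann/FP1 | Semana XI/Caracteres iguales.py | caracteres_iguales
-- ===== SOURCE A (Python) =====
-- def caracteres_iguales(string_1, string_2):
--
--     return (
--         [] if (
--             len(string_1) == 0 or len(string_2) == 0
--         ) else (
--             [1] + caracteres_iguales(string_1[1:], string_2[1:])
--         ) if string_1[0] == string_2[0] else (
--             [0] + caracteres_iguales(string_1[1:], string_2[1:])
--         )
--     )
-- ===== SOURCE B (Python) =====
-- def caracteres_iguales(string_1, string_2):
--     result = []
--     for i in range(min(len(string_1), len(string_2))):
--         if string_1[i] == string_2[i]: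
--             result.append(1)
--         else:
--             result.append(0)
--     return result
-- ===== Notes on version B (the rewrite author's own statement) =====
-- stated objective: simpler
-- what changed: Replaced A's head/tail recursion with repeated string slicing by a single indexed loop over the shorter length appending 1/0 to an accumulator list.
import Mathlib
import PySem

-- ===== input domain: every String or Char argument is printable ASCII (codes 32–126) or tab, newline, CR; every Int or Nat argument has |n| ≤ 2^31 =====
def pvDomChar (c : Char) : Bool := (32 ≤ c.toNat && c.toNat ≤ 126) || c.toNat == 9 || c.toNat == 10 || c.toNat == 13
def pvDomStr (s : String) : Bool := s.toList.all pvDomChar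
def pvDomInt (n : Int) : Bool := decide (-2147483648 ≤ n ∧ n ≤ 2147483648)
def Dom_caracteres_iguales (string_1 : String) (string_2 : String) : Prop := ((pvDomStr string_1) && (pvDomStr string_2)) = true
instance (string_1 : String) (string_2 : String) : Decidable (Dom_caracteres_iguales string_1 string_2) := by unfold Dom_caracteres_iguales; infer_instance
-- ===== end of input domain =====

-- B replaces A's head/tail recursion (which slices both strings at every step) by one
-- indexed loop over the shorter length with an accumulator; return values are identical.

-- ===== PORT A =====
-- A's recursion: empty check first, then compare heads, prepend 1/0, recurse on the tails.
def pvAgo : List Char → List Char → List Int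
  | [], _ => []
  | _ :: _, [] => []
  | a :: t1, b :: t2 => (if a == b then (1 : Int) else 0) :: pvAgo t1 t2

def caracteres_iguales (string_1 : String) (string_2 : String) : List Int :=
  pvAgo string_1.toList string_2.toList

-- ===== PORT B =====
-- B's loop: for i in range(min(len1,len2)): append 1 if chars equal else 0.
def caracteres_iguales_alt (string_1 : String) (string_2 : String) : List Int :=
  let l1 := string_1.toList
  let l2 := string_2.toList
  (List.range (min l1.length l2.length)).foldl
    (fun result i => result ++ [if l1.getD i ' ' == l2.getD i ' ' then (1 : Int) else 0]) []

-- ===== PRECONDITION & SPEC =====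
def Spec_caracteres_iguales (string_1 : String) (string_2 : String) (out : List Int) : Prop := out = caracteres_iguales_alt string_1 string_2
instance (string_1 : String) (string_2 : String) (out : List Int) : Decidable (Spec_caracteres_iguales string_1 string_2 out) := by unfold Spec_caracteres_iguales; infer_instance

-- ===== CLAIM (what is proved, stated in full; the proofs are below) =====
def Claim_equal_caracteres_iguales : Prop := ∀ (string_1 : String) (string_2 : String), Dom_caracteres_iguales string_1 string_2 → Spec_caracteres_iguales string_1 string_2 (caracteres_iguales string_1 string_2)

-- ===== LEMMAS AND PROOFS =====

-- Folding appends over a range is mapping over the range.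
theorem pv_foldl_range_append {α : Type} (f : Nat → α) (n : Nat) (acc : List α) :
    (List.range n).foldl (fun r i => r ++ [f i]) acc = acc ++ (List.range n).map f := by
  induction n generalizing acc with
  | zero => simp
  | succ k ih => simp [List.range_succ, List.foldl_append, ih]

-- A's recursion equals the index map up to the shorter length.
theorem pvAgo_eq_map (l1 l2 : List Char) :
    pvAgo l1 l2 =
      (List.range (min l1.length l2.length)).map
        (fun i => if l1.getD i ' ' == l2.getD i ' ' then (1 : Int) else 0) := by
  induction l1 generalizing l2 with
  | nil => simp [pvAgo]
  | cons a t1 ih =>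
    cases l2 with
    | nil => simp [pvAgo]
    | cons b t2 =>
      simp only [pvAgo, List.length_cons, Nat.succ_min_succ, List.range_succ_eq_map,
        List.map_cons, List.map_map, ih t2]
      refine congrArg₂ _ rfl ?_
      apply List.map_congr_left
      intro i _
      simp [Function.comp]

-- ===== VERDICT (by name: the statement is the Claim_ definition above) =====
theorem caracteres_iguales_spec : Claim_equal_caracteres_iguales := by
  intro s1 s2 _
  unfold Spec_caracteres_iguales caracteres_iguales caracteres_iguales_alt
  rw [pv_foldl_range_append, pvAgo_eq_map]
  simp
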